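-- pv_equiv track=rewrite | github.com/XYRU10/ePortfolio | w/assets/files/automata PIT/og encrypt.py | replace_vowels_decrypt
-- ===== SOURCE A (Python) =====
-- def caesar_encrypt(text, shift):
--     """Encrypts text using Caesar cipher."""
--     encrypted = ""
--     for char in text:
--         if char.isalpha():
--             shift_base = 65 if char.isupper() else 97
--             encrypted += chr((ord(char) - shift_base + shift) % 26 + shift_base)
--         else:
--             encrypted += char
--     return encrypted
--
-- def caesar_decrypt(text, shift):
--     """Decrypts text using Caesar cipher."""
--     return caesar_encrypt(text, -shift)
--
-- def replace_vowels_decrypt(text):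
--     """Decrypts text by reversing the vowel replacement and Caesar cipher."""
--     text = caesar_decrypt(text, 2)
--     vowel_map = {'0': 'a', '1': 'e', '2': 'i', '3': 'o', '4': 'u'}
--     decrypted = ""
--     for char in text:
--         if char in vowel_map:
--             decrypted += vowel_map[char]
--         else:
--             decrypted += char
--     return decrypted
-- ===== SOURCE B (Python) =====
-- # Table-driven rewrite: one precomputed char->char dict (Caesar shift -2 merged
-- # with the digit->vowel map), then a single-pass join instead of A's two
-- # quadratic string-concatenation loops.
-- _TABLE = {}
-- for _i in range(26):
--     _TABLE[chr(65 + _i)] = chr(65 + (_i - 2) % 26)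
-- for _i in range(26):
--     _TABLE[chr(97 + _i)] = chr(97 + (_i - 2) % 26)
-- for _d, _v in zip('01234', 'aeiou'):
--     _TABLE[_d] = _v
--
-- def replace_vowels_decrypt(text):
--     get = _TABLE.get
--     return ''.join(get(ch, ch) for ch in text)
-- ===== Notes on version B (the rewrite author's own statement) =====
-- stated objective: faster
-- what changed: Replaced A's two sequential loops with quadratic string concatenation and inline Caesar arithmetic by one precomputed char->char dict (Caesar -2 shift merged with the digit->vowel map) applied in a single str.join pass.
import Mathlib
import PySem

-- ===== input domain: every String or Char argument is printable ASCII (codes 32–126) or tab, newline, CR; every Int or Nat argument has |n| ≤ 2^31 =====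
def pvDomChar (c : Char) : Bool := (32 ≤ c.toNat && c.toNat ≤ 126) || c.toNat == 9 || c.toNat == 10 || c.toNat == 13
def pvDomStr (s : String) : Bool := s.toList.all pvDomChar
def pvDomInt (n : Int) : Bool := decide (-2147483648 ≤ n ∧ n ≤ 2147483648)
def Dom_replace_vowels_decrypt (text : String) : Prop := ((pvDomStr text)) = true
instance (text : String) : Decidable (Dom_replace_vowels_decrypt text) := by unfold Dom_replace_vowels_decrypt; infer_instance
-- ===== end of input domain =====

-- B replaces A's two quadratic string-concatenation loops by one precomputed lookup table and a single map pass (faster).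

-- ===== PORT A =====
-- chr() is ported as Char.ofNat ∘ Int.toNat: its argument here is always base + (x mod 26) ∈ [65,122], in range, so this is exact
def caesar_encrypt (text : String) (shift : Int) : String :=
  String.ofList (text.toList.foldl (fun encrypted char =>
    if PySem.Chars.isalpha char then
      let shift_base : Int := if PySem.Chars.isupper char then 65 else 97
      encrypted ++ [Char.ofNat (PySem.Int.mod ((char.toNat : Int) - shift_base + shift) 26 + shift_base).toNat]
    else
      encrypted ++ [char]) [])

def caesar_decrypt (text : String) (shift : Int) : String :=
  caesar_encrypt text (-shift)

def replace_vowels_decrypt (text : String) : String :=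
  let text' := caesar_decrypt text 2
  let vowel_map : PySem.Dict Char Char :=
    PySem.Dict.ofList [('0','a'), ('1','e'), ('2','i'), ('3','o'), ('4','u')]
  String.ofList (text'.toList.foldl (fun decrypted char =>
    if vowel_map.contains char then
      decrypted ++ [(vowel_map.get? char).getD char]
    else
      decrypted ++ [char]) [])

-- ===== PORT B =====
-- the module-level table of Source B: Caesar(-2) for all letters, then the digit→vowel entries
def pvTable : PySem.Dict Char Char :=
  let d1 := (PySem.List.pyRange 0 26 1).foldl (fun d i =>
      d.insert (Char.ofNat (65 + i).toNat) (Char.ofNat (65 + PySem.Int.mod (i - 2) 26).toNat))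
    PySem.Dict.empty
  let d2 := (PySem.List.pyRange 0 26 1).foldl (fun d i =>
      d.insert (Char.ofNat (97 + i).toNat) (Char.ofNat (97 + PySem.Int.mod (i - 2) 26).toNat)) d1
  (List.zip "01234".toList "aeiou".toList).foldl (fun d p => d.insert p.1 p.2) d2

def replace_vowels_decrypt_alt (text : String) : String :=
  String.ofList (text.toList.map (fun ch => pvTable.getD ch ch))

-- ===== PRECONDITION & SPEC =====
def Spec_replace_vowels_decrypt (text : String) (out : String) : Prop := out = replace_vowels_decrypt_alt text
instance (text : String) (out : String) : Decidable (Spec_replace_vowels_decrypt text out) := by unfold Spec_replace_vowels_decrypt; infer_instance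

-- ===== CLAIM (what is proved, stated in full; the proofs are below) =====
def Claim_equal_replace_vowels_decrypt : Prop := ∀ (text : String), Dom_replace_vowels_decrypt text → Spec_replace_vowels_decrypt text (replace_vowels_decrypt text)

-- ===== LEMMAS AND PROOFS =====

-- A's per-character Caesar step (shift already negated to -2)
def pvStepC (c : Char) : Char :=
  if PySem.Chars.isalpha c then
    let base : Int := if PySem.Chars.isupper c then 65 else 97
    Char.ofNat (PySem.Int.mod ((c.toNat : Int) - base + (-2)) 26 + base).toNat
  else c

-- A's per-character vowel-restoration step
def pvStepV (c : Char) : Char :=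
  let vm : PySem.Dict Char Char :=
    PySem.Dict.ofList [('0','a'), ('1','e'), ('2','i'), ('3','o'), ('4','u')]
  if vm.contains c then (vm.get? c).getD c else c

theorem pv_foldl_append_map {α β : Type} (f : α → β) (l : List α) (init : List β) :
    l.foldl (fun acc c => acc ++ [f c]) init = init ++ l.map f := by
  induction l generalizing init with
  | nil => simp
  | cons x xs ih => simp [List.foldl, ih]

theorem pv_foldl_ite_append {α β : Type} (p : α → Bool) (f g : α → β) (l : List α) (init : List β) :
    l.foldl (fun acc c => if p c then acc ++ [f c] else acc ++ [g c]) init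
      = l.foldl (fun acc c => acc ++ [if p c then f c else g c]) init := by
  induction l generalizing init with
  | nil => rfl
  | cons x xs ih => by_cases h : p x <;> simp [List.foldl, h, ih]

theorem pv_A_eq_map (text : String) :
    replace_vowels_decrypt text = String.ofList (text.toList.map (fun c => pvStepV (pvStepC c))) := by
  unfold replace_vowels_decrypt caesar_decrypt caesar_encrypt
  rw [pv_foldl_ite_append, pv_foldl_append_map]
  simp only [String.toList_ofList, List.nil_append]
  rw [pv_foldl_ite_append, pv_foldl_append_map]
  simp [pvStepC, pvStepV, List.map_map, Function.comp_def]

-- finite check of the per-character agreement on the ASCII range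
set_option maxRecDepth 100000 in
theorem pv_key_fin : ∀ n : Fin 128,
    pvTable.getD (Char.ofNat n.1) (Char.ofNat n.1) = pvStepV (pvStepC (Char.ofNat n.1)) := by
  decide

theorem pv_key (c : Char) (h : pvDomChar c = true) :
    pvTable.getD c c = pvStepV (pvStepC c) := by
  have hlt : c.toNat < 128 := by
    simp [pvDomChar] at h
    omega
  have := pv_key_fin ⟨c.toNat, hlt⟩
  simpa [Char.ofNat_toNat] using this

-- ===== VERDICT (by name: the statement is the Claim_ definition above) =====
theorem replace_vowels_decrypt_spec : Claim_equal_replace_vowels_decrypt := by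
  intro text hdom
  unfold Spec_replace_vowels_decrypt replace_vowels_decrypt_alt
  rw [pv_A_eq_map]
  refine congrArg String.ofList ?_
  apply List.map_congr_left
  intro c hc
  have h : pvDomChar c = true := by
    have := (List.all_eq_true.mp hdom) c hc
    simpa using this
  exact (pv_key c h).symm
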